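-- pv_equiv track=rewrite | github.com/manjotvs/workspace | concatenation_words.py | populate_table
-- ===== SOURCE A (Python) =====
-- def populate_table(table, words):
--     # first populate all the words in table
--     counter = 0
--     total_len = 0
--     if(len(words)):
--         for word in words :
--             if(word not in table):
--                 counter+=1
--             table[word] = 0
--         for word in words :
--             total_len+=len(word)
--             table[word]+= 1
--         return counter, total_len
--     return None, None
-- ===== SOURCE B (Python) =====
-- def populate_table(table, words):
--     if not words:
--         return None, None
--     cnt = {}
--     for w in words:
--         cnt[w] = cnt.get(w, 0) + 1
--     counter = sum(1 for w in cnt if w not in table)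
--     total_len = sum(len(w) * n for w, n in cnt.items())
--     for w, n in cnt.items():
--         table[w] = n
--     return counter, total_len
-- ===== Notes on version B (the rewrite author's own statement) =====
-- stated objective: idiomatic
-- what changed: B builds a frequency map of the words in one pass and computes the new-word count and the length total from the map's distinct entries (len(w)*n per distinct word), instead of A's two full scans of the word list interleaved with table mutation.
import Mathlib
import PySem

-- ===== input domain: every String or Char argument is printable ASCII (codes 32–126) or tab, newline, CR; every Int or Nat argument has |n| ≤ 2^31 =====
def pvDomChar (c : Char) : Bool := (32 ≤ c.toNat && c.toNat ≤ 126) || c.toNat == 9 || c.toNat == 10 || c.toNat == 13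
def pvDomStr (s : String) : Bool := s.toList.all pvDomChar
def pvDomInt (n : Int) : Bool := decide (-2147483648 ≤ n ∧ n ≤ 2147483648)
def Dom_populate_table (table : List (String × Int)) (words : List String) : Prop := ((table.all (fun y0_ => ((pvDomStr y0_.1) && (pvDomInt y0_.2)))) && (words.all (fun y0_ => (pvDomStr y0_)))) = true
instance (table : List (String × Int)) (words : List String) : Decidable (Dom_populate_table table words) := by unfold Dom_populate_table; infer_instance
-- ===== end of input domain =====

-- B builds one frequency map and then iterates over the distinct words (one aggregation pass)
-- instead of A's two full scans of the word list; objective: idiomatic. Both mutate `table`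
-- identically in Python; the equivalence proved here is about the return value.


-- ===== PORT A =====
-- first loop: counter of words not yet in table, then table[word] = 0
def pvStepCount (s : Int × PySem.Dict String Int) (w : String) : Int × PySem.Dict String Int :=
  ((if !(s.2.contains w) then s.1 + 1 else s.1), s.2.insert w 0)

-- second loop: total_len += len(word); table[word] += 1
def pvStepTotal (s : Int × PySem.Dict String Int) (w : String) : Int × PySem.Dict String Int :=
  (s.1 + PySem.Str.len w, s.2.modify w 0 (· + 1))

def populate_table (table : List (String × Int)) (words : List String) : Option Int × Option Int :=
  if words.length ≠ 0 then
    let s1 := words.foldl pvStepCount ((0 : Int), PySem.Dict.ofList table)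
    let s2 := words.foldl pvStepTotal ((0 : Int), s1.2)
    (some s1.1, some s2.1)
  else (none, none)

-- ===== PORT B =====
def populate_table_alt (table : List (String × Int)) (words : List String) : Option Int × Option Int :=
  if words.length = 0 then (none, none)
  else
    let cnt : PySem.Dict String Int :=
      words.foldl (fun d w => d.insert w (d.getD w 0 + 1)) PySem.Dict.empty
    let t : PySem.Dict String Int := PySem.Dict.ofList table
    let counter : Int :=
      (((cnt.keys.filter (fun w => !(t.contains w))).map (fun _ => (1 : Int)))).sum
    let total : Int := (cnt.items.map (fun p => PySem.Str.len p.1 * p.2)).sum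
    (some counter, some total)

-- ===== PRECONDITION & SPEC =====
def Spec_populate_table (table : List (String × Int)) (words : List String) (out : Option Int × Option Int) : Prop := out = populate_table_alt table words
instance (table : List (String × Int)) (words : List String) (out : Option Int × Option Int) : Decidable (Spec_populate_table table words out) := by unfold Spec_populate_table; infer_instance

-- ===== CLAIM (what is proved, stated in full; the proofs are below) =====
def Claim_equal_populate_table : Prop := ∀ (table : List (String × Int)) (words : List String), Dom_populate_table table words → Spec_populate_table table words (populate_table table words)

-- ===== LEMMAS AND PROOFS =====

-- A's first loop, dict component: it is the plain insert-0 loop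
theorem pvCount_snd (words : List String) (c : Int) (d : PySem.Dict String Int) :
    (words.foldl pvStepCount (c, d)).2
      = words.foldl (fun d w => d.insert w ((fun (_ : PySem.Dict String Int) (_ : String) => (0 : Int)) d w)) d := by
  induction words generalizing c d with
  | nil => rfl
  | cons w ws ih => simp [List.foldl, pvStepCount, ih]

-- A's first loop, counter component: counts the distinct words that d does not contain
theorem pvCount_fst (words : List String) (c : Int) (d : PySem.Dict String Int) :
    (words.foldl pvStepCount (c, d)).1
      = c + ((((PySem.Set.ofList words).filter (fun w => !(d.contains w))).map (fun _ => (1 : Int)))).sum := by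
  induction words using List.reverseRecOn generalizing c with
  | nil => simp [PySem.Set.ofList]
  | append_singleton ws w ih =>
    rw [List.foldl_append]
    have hsnd := pvCount_snd ws c d
    have hkeys := PySem.Dict.keys_foldl_insert ws (fun _ _ => (0 : Int)) d
    by_cases hw : w ∈ ws
    · have hc : ((ws.foldl pvStepCount (c, d)).2).contains w = true := by
        rw [hsnd, PySem.Dict.contains_iff_mem_keys, hkeys, PySem.Set.mem_update]
        exact Or.inr hw
      have hS : PySem.Set.ofList (ws ++ [w]) = PySem.Set.ofList ws := by
        rw [PySem.Set.ofList_append_singleton,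
            PySem.Set.add_of_mem ((PySem.Set.mem_ofList ws w).mpr hw)]
      simp [List.foldl, pvStepCount, hc, hS, ih]
    · have hc : ((ws.foldl pvStepCount (c, d)).2).contains w = d.contains w := by
        rw [hsnd]
        by_cases hd : d.contains w = true
        · rw [hd, PySem.Dict.contains_iff_mem_keys, hkeys, PySem.Set.mem_update]
          exact Or.inl ((PySem.Dict.contains_iff_mem_keys d w).mp hd)
        · simp only [Bool.not_eq_true] at hd
          rw [hd, ← Bool.not_eq_true]
          intro hmem
          rw [PySem.Dict.contains_iff_mem_keys, hkeys, PySem.Set.mem_update] at hmem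
          rcases hmem with h | h
          · exact absurd ((PySem.Dict.contains_iff_mem_keys d w).mpr h) (by simp [hd])
          · exact hw h
      have hS : PySem.Set.ofList (ws ++ [w]) = PySem.Set.ofList ws ++ [w] := by
        rw [PySem.Set.ofList_append_singleton,
            PySem.Set.add_of_not_mem (fun h => hw ((PySem.Set.mem_ofList ws w).mp h))]
      rw [hS] at *
      by_cases hd : d.contains w = true
      · simp [List.foldl, pvStepCount, hc, hd, ih]
      · simp only [Bool.not_eq_true] at hd
        simp [List.foldl, pvStepCount, hc, hd, ih]
        ring

-- A's second loop, total component: the sum of the word lengths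
theorem pvTotal_fst (words : List String) (a : Int) (d : PySem.Dict String Int) :
    (words.foldl pvStepTotal (a, d)).1 = a + (words.map PySem.Str.len).sum := by
  induction words generalizing a d with
  | nil => simp
  | cons w ws ih => simp [List.foldl, pvStepTotal, ih]; ring

-- a nodup list containing w sums f over it as f w plus the sum over the list with w filtered out
theorem pvSum_pick {α : Type} [BEq α] [LawfulBEq α] (l : List α) (f : α → Int) (w : α)
    (hnd : l.Nodup) (hw : w ∈ l) :
    (l.map f).sum = f w + ((l.filter (fun y => !(y == w))).map f).sum := by
  induction l with
  | nil => cases hw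
  | cons x xs ih =>
    by_cases hxw : x = w
    · subst hxw
      have hnx : x ∉ xs := (List.nodup_cons.mp hnd).1
      have hx : xs.filter (fun y => !(y == x)) = xs := by
        apply List.filter_eq_self.mpr
        intro y hy
        simp only [Bool.not_eq_eq_eq_not, Bool.not_true, beq_eq_false_iff_ne, ne_eq]
        exact fun h => hnx (h ▸ hy)
      rw [List.filter_cons_of_neg (by simp)]
      simp [hx]
    · have hw' : w ∈ xs := by
        rcases List.mem_cons.mp hw with h | h
        · exact absurd h.symm hxw
        · exact h
      rw [List.filter_cons_of_pos (by simp [hxw])]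
      simp only [List.map_cons, List.sum_cons, ih (List.nodup_cons.mp hnd).2 hw']
      ring

-- B's total: summing len·count over the distinct words equals summing len over all words
theorem pvTotal_counter (words : List String) :
    (((PySem.Set.ofList words).map (fun k => PySem.Str.len k * (words.count k : Int)))).sum
      = (words.map PySem.Str.len).sum := by
  induction words with
  | nil => simp [PySem.Set.ofList]
  | cons w ws ih =>
    rw [PySem.Set.ofList_cons]
    by_cases hw : w ∈ ws
    · have hwS : w ∈ PySem.Set.ofList ws := (PySem.Set.mem_ofList ws w).mpr hw
      have hpick := pvSum_pick (PySem.Set.ofList ws)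
        (fun k => PySem.Str.len k * (ws.count k : Int)) w (PySem.Set.nodup_ofList ws) hwS
      have hdis : (PySem.Set.ofList ws).discard w
          = (PySem.Set.ofList ws).filter (fun y => !(y == w)) := rfl
      have hcnt : ∀ k ∈ (PySem.Set.ofList ws).filter (fun y => !(y == w)),
          (((w :: ws).count k : Int)) = (ws.count k : Int) := by
        intro k hk
        have : k ≠ w := by simpa using (List.mem_filter.mp hk).2
        simp [Ne.symm this]
      calc (((w :: (PySem.Set.ofList ws).discard w).map
              (fun k => PySem.Str.len k * ((w :: ws).count k : Int)))).sum
          = PySem.Str.len w * ((w :: ws).count w : Int)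
            + ((((PySem.Set.ofList ws).filter (fun y => !(y == w))).map
                (fun k => PySem.Str.len k * ((w :: ws).count k : Int)))).sum := by
            rw [hdis]; simp
        _ = PySem.Str.len w * (ws.count w : Int) + PySem.Str.len w
            + ((((PySem.Set.ofList ws).filter (fun y => !(y == w))).map
                (fun k => PySem.Str.len k * (ws.count k : Int)))).sum := by
            rw [List.map_congr_left (fun k hk => by rw [hcnt k hk])]
            simp [List.count_cons_self]
            ring
        _ = PySem.Str.len w + (((PySem.Set.ofList ws).map
                (fun k => PySem.Str.len k * (ws.count k : Int)))).sum := by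
            rw [hpick]; ring
        _ = (((w :: ws).map PySem.Str.len)).sum := by
            rw [ih]; simp
    · have hdis : (PySem.Set.ofList ws).discard w = PySem.Set.ofList ws := by
        simp only [PySem.Set.discard]
        apply List.filter_eq_self.mpr
        intro y hy
        have hyw : y ∈ ws := (PySem.Set.mem_ofList ws y).mp hy
        simp only [Bool.not_eq_eq_eq_not, Bool.not_true, beq_eq_false_iff_ne, ne_eq]
        exact fun h => hw (h ▸ hyw)
      have hcnt : ∀ k ∈ PySem.Set.ofList ws,
          (((w :: ws).count k : Int)) = (ws.count k : Int) := by
        intro k hk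
        have : k ≠ w := fun h => hw (h ▸ (PySem.Set.mem_ofList ws k).mp hk)
        simp [Ne.symm this]
      have hw0 : ws.count w = 0 := List.count_eq_zero.mpr hw
      have hmap : (PySem.Set.ofList ws).map (fun k => PySem.Str.len k * (((w :: ws).count k : Int)))
          = (PySem.Set.ofList ws).map (fun k => PySem.Str.len k * ((ws.count k : Int))) :=
        List.map_congr_left (fun k hk => by rw [hcnt k hk])
      rw [hdis]
      simp only [List.map_cons, List.sum_cons, List.count_cons_self, hw0, hmap]
      rw [ih]
      simp

-- ===== VERDICT (by name: the statement is the Claim_ definition above) =====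
theorem populate_table_spec : Claim_equal_populate_table := by
  intro table words _
  unfold Spec_populate_table populate_table populate_table_alt
  by_cases h : words.length = 0
  · simp [h]
  · rw [if_neg h, if_pos h]
    have hcnt : words.foldl (fun d w => d.insert w (d.getD w 0 + 1)) PySem.Dict.empty
        = PySem.Dict.counter words := PySem.Dict.foldl_insert_getD_add_one_eq_counter words
    simp only [hcnt, PySem.Dict.keys_counter, PySem.Dict.items_counter,
      pvCount_fst words 0 (PySem.Dict.ofList table),
      pvTotal_fst words 0, List.map_map, Prod.mk.injEq, Option.some.injEq]
    constructor
    · ring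
    · rw [← pvTotal_counter words]
      simp [Function.comp_def, PySem.Str.len]
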